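-- pv_equiv track=rewrite | github.com/LeiMa0324/Krone_official | krone_hierarchy/Krone_seq.py | find_largest_suffix_subsequence
-- ===== SOURCE A (Python) =====
-- def is_sublist(test, trains):
--     test_seq = '|'.join(test)
--     for train in trains:
--         train_seq = '|'.join(train)
--         if test_seq in train_seq:
--             return True
--     return False
--
-- def find_largest_suffix_subsequence(test, train_seqs):
--     if len(test) <= 1:
--         return [], (len(test), len(test))
--     largest_suffix_subsequence = []
--     for i in range(len(test)-1, -1, -1):
--         subseq = test[i: len(test)]
--         is_sub = is_sublist(subseq, train_seqs)
--         if is_sub: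
--             largest_suffix_subsequence.append(test[i])
--         else:
--             largest_suffix_subsequence.reverse()
--             return largest_suffix_subsequence, (i +1,len(test))
--     largest_suffix_subsequence.reverse()
--     return largest_suffix_subsequence, (0, len(test))
-- ===== SOURCE B (Python) =====
-- def find_largest_suffix_subsequence(test, train_seqs):
--     n = len(test)
--     if n <= 1:
--         return [], (n, n)
--     joined_trains = ['|'.join(t) for t in train_seqs]
--
--     def matches(i):
--         s = '|'.join(test[i:])
--         return any(s in tj for tj in joined_trains)
--
--     # binary search for the least i with matches(i) (n if none);
--     # the predicate is monotone: a shorter suffix's join is a suffix of a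
--     # longer suffix's join, hence still a substring of the same train.
--     lo, hi = 0, n
--     while lo < hi:
--         mid = (lo + hi) // 2
--         if matches(mid):
--             hi = mid
--         else:
--             lo = mid + 1
--     return test[lo:], (lo, n)
-- ===== Notes on version B (the rewrite author's own statement) =====
-- stated objective: alternative
-- what changed: Replaces A's linear downward scan over suffix starts (re-joining every train sequence at each step) by a binary search on the suffix start index, valid because the substring-match predicate is monotone in the start index, with the train joins hoisted out of the loop; on typical inputs where the scan stops almost immediately A is not slower, so no speed is claimed.
import Mathlib
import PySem

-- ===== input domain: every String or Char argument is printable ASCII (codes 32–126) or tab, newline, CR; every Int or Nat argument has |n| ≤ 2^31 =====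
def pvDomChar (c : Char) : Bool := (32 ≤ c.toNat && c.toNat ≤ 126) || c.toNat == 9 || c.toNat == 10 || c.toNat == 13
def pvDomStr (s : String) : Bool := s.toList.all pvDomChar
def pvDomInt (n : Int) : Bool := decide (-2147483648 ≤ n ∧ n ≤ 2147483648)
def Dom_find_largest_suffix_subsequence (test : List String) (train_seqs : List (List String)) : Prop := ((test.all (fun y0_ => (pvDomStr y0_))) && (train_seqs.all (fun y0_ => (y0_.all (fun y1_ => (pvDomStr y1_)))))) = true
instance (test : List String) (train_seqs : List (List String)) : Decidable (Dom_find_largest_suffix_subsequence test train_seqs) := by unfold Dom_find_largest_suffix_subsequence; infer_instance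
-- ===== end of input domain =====

-- B replaces A's linear downward scan over suffix starts (re-joining every train at each
-- step) by a binary search on the suffix start index — valid because the substring-match
-- predicate is monotone in the start index — with the train joins hoisted out of the loop
-- (a structurally different algorithm; no speed claim).


-- ===== PORT A =====
def is_sublist_loop (test_seq : String) : List (List String) → Bool
  | [] => false
  | train :: rest =>
    let train_seq := PySem.Str.join "|" train
    if PySem.Str.isIn test_seq train_seq then true
    else is_sublist_loop test_seq rest

def is_sublist (test : List String) (trains : List (List String)) : Bool :=
  is_sublist_loop (PySem.Str.join "|" test) trains

def fls_loopA (test : List String) (train_seqs : List (List String)) :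
    List Int → List String → List String × (Int × Int)
  | [], acc => (acc.reverse, (0, PySem.List.len test))
  | i :: rest, acc =>
    let subseq := PySem.List.slice test (some i) (some (PySem.List.len test))
    let is_sub := is_sublist subseq train_seqs
    if is_sub then
      fls_loopA test train_seqs rest (acc ++ [PySem.List.pyGetD test i ""])
    else (acc.reverse, (i + 1, PySem.List.len test))

def find_largest_suffix_subsequence (test : List String) (train_seqs : List (List String)) : List String × (Int × Int) :=
  if PySem.List.len test ≤ 1 then ([], (PySem.List.len test, PySem.List.len test))
  else fls_loopA test train_seqs (PySem.List.pyRange (PySem.List.len test - 1) (-1) (-1)) []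

-- ===== PORT B =====
def fls_matches (test : List String) (joined_trains : List String) (i : Int) : Bool :=
  let s := PySem.Str.join "|" (PySem.List.slice test (some i) none)
  joined_trains.any (fun tj => PySem.Str.isIn s tj)

def fls_bsearch (test : List String) (joined_trains : List String) (lo hi : Nat) : Nat :=
  if _h : lo < hi then
    let mid := (lo + hi) / 2
    if fls_matches test joined_trains (mid : Int) then
      fls_bsearch test joined_trains lo mid
    else
      fls_bsearch test joined_trains (mid + 1) hi
  else lo
termination_by hi - lo
decreasing_by all_goals omega

def find_largest_suffix_subsequence_alt (test : List String) (train_seqs : List (List String)) : List String × (Int × Int) :=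
  let n := test.length
  if n ≤ 1 then ([], ((n : Int), (n : Int)))
  else
    let joined_trains := train_seqs.map (fun t => PySem.Str.join "|" t)
    let lo := fls_bsearch test joined_trains 0 n
    (PySem.List.slice test (some (lo : Int)) none, ((lo : Int), (n : Int)))

-- ===== PRECONDITION & SPEC =====
def Spec_find_largest_suffix_subsequence (test : List String) (train_seqs : List (List String)) (out : List String × (Int × Int)) : Prop := out = find_largest_suffix_subsequence_alt test train_seqs
instance (test : List String) (train_seqs : List (List String)) (out : List String × (Int × Int)) : Decidable (Spec_find_largest_suffix_subsequence test train_seqs out) := by unfold Spec_find_largest_suffix_subsequence; infer_instance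

-- ===== CLAIM (what is proved, stated in full; the proofs are below) =====
def Claim_equal_find_largest_suffix_subsequence : Prop := ∀ (test : List String) (train_seqs : List (List String)), Dom_find_largest_suffix_subsequence test train_seqs → Spec_find_largest_suffix_subsequence test train_seqs (find_largest_suffix_subsequence test train_seqs)

-- ===== LEMMAS AND PROOFS =====

def flsQ (test : List String) (trains : List (List String)) (i : Nat) : Bool :=
  (trains.map (fun t => PySem.Str.join "|" t)).any
    (fun tj => PySem.Str.isIn (PySem.Str.join "|" (test.drop i)) tj)

lemma is_sublist_loop_eq_any (s : String) (trains : List (List String)) :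
    is_sublist_loop s trains
      = (trains.map (fun t => PySem.Str.join "|" t)).any (fun tj => PySem.Str.isIn s tj) := by
  induction trains with
  | nil => rfl
  | cons t rest ih =>
    simp only [is_sublist_loop, List.map_cons, List.any_cons, ih]
    cases h : PySem.Str.isIn s (PySem.Str.join "|" t) <;> simp [h]

lemma flsQ_eq_A (test : List String) (trains : List (List String)) (i : Nat) :
    is_sublist (PySem.List.slice test (some (i : Int)) (some (PySem.List.len test))) trains
      = flsQ test trains i := by
  have hs : PySem.List.slice test (some (i : Int)) (some (PySem.List.len test)) = test.drop i := by
    rw [PySem.List.len_eq, PySem.List.slice_natCast]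
    exact List.take_of_length_le (by simp)
  rw [is_sublist, hs, is_sublist_loop_eq_any, flsQ]

lemma flsQ_eq_B (test : List String) (trains : List (List String)) (i : Nat) :
    fls_matches test (trains.map (fun t => PySem.Str.join "|" t)) (i : Int)
      = flsQ test trains i := by
  rw [fls_matches, flsQ, PySem.List.slice_from_natCast]

lemma join_tail_isIn (l : List String) (tj : String)
    (h : PySem.Str.isIn (PySem.Str.join "|" l) tj = true) :
    PySem.Str.isIn (PySem.Str.join "|" l.tail) tj = true := by
  rw [PySem.Str.isIn_iff_infix] at h ⊢
  refine List.IsInfix.trans ?_ h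
  rw [PySem.Str.toList_join, PySem.Str.toList_join]
  apply List.IsSuffix.isInfix
  match l with
  | [] => simp [PySem.Chars.join_nil]
  | [x] => simp [PySem.Chars.join_nil, PySem.Chars.join_singleton, List.nil_suffix]
  | x :: y :: r =>
    rw [List.tail_cons]
    simp only [List.map_cons, PySem.Chars.join_cons_cons]
    exact List.suffix_append _ _

lemma flsQ_mono (test : List String) (trains : List (List String)) (i : Nat)
    (h : flsQ test trains i = true) : flsQ test trains (i + 1) = true := by
  rw [flsQ, List.any_eq_true] at h ⊢
  obtain ⟨tj, htj, hin⟩ := h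
  have h2 := join_tail_isIn (test.drop i) tj hin
  rw [List.tail_drop] at h2
  exact ⟨tj, htj, h2⟩

lemma flsQ_mono_le (test : List String) (trains : List (List String)) {i j : Nat}
    (hij : i ≤ j) (h : flsQ test trains i = true) : flsQ test trains j = true := by
  induction j, hij using Nat.le_induction with
  | base => exact h
  | succ j _ ih => exact flsQ_mono test trains j ih

lemma fls_loopA_all (test : List String) (trains : List (List String)) (k : Nat)
    (hk : k < test.length) (hall : ∀ j, j ≤ k → flsQ test trains j = true) :
    ∀ acc : List String,
    fls_loopA test trains (PySem.List.pyRange (k : Int) (-1) (-1)) acc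
      = (test.take (k + 1) ++ acc.reverse, (0, (test.length : Int))) := by
  induction k with
  | zero =>
    intro acc
    rw [PySem.List.pyRange_neg_one_cons (by omega), PySem.List.pyRange_neg_one_eq_nil (by omega)]
    simp only [fls_loopA]
    rw [flsQ_eq_A, hall 0 (by omega), if_pos rfl]
    rw [PySem.List.pyGetD_natCast, List.getD_eq_getElem test "" hk, PySem.List.len_eq]
    conv_rhs => rw [List.take_succ (i := 0), List.getElem?_eq_getElem hk]
    simp only [List.reverse_append, List.reverse_singleton, List.singleton_append, List.append_assoc, Option.toList_some, List.take_zero, List.nil_append]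
  | succ k ih =>
    intro acc
    have hc : ((k + 1 : Nat) : Int) - 1 = (k : Int) := by push_cast; ring
    rw [PySem.List.pyRange_neg_one_cons (by omega), hc]
    simp only [fls_loopA]
    rw [flsQ_eq_A, hall (k + 1) (by omega), if_pos rfl]
    rw [PySem.List.pyGetD_natCast, List.getD_eq_getElem test "" hk]
    rw [ih (by omega) (fun j hj => hall j (by omega))]
    conv_rhs => rw [List.take_succ (i := k + 1), List.getElem?_eq_getElem hk]
    simp only [List.reverse_append, List.reverse_singleton, List.singleton_append, List.append_assoc, Option.toList_some, List.take_zero, List.nil_append]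

lemma fls_loopA_stop (test : List String) (trains : List (List String)) (k r : Nat)
    (hrk : r ≤ k) (hk : k < test.length) (hr : flsQ test trains r = false)
    (habove : ∀ j, r < j → j ≤ k → flsQ test trains j = true) :
    ∀ acc : List String,
    fls_loopA test trains (PySem.List.pyRange (k : Int) (-1) (-1)) acc
      = ((test.take (k + 1)).drop (r + 1) ++ acc.reverse, ((r : Int) + 1, (test.length : Int))) := by
  induction k with
  | zero =>
    intro acc
    have hr0 : r = 0 := by omega
    subst hr0
    rw [PySem.List.pyRange_neg_one_cons (by omega)]
    simp only [fls_loopA]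
    rw [flsQ_eq_A, hr, if_neg (by simp), PySem.List.len_eq]
    simp
  | succ k ih =>
    intro acc
    have hc : ((k + 1 : Nat) : Int) - 1 = (k : Int) := by push_cast; ring
    rw [PySem.List.pyRange_neg_one_cons (by omega), hc]
    simp only [fls_loopA]
    rcases Nat.eq_or_lt_of_le hrk with hrk2 | hrk2
    · rw [flsQ_eq_A]
      rw [hrk2] at hr ⊢
      rw [hr, if_neg (by simp), PySem.List.len_eq]
      simp
    · have hQ : flsQ test trains (k + 1) = true := habove (k + 1) (by omega) (by omega)
      rw [flsQ_eq_A, hQ, if_pos rfl]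
      rw [PySem.List.pyGetD_natCast, List.getD_eq_getElem test "" hk]
      rw [ih (by omega) (by omega) (fun j h1 h2 => habove j h1 (by omega))]
      conv_rhs => rw [List.take_succ (i := k + 1), List.getElem?_eq_getElem hk]
      rw [List.drop_append_of_le_length (by simp; omega)]
      simp only [List.reverse_append, List.reverse_singleton, List.singleton_append, List.append_assoc, Option.toList_some, List.take_zero, List.nil_append]

lemma fls_bsearch_spec (test : List String) (trains : List (List String)) (t : Nat)
    (hbelow : ∀ j, j < t → flsQ test trains j = false)
    (habove : ∀ j, t ≤ j → j < test.length → flsQ test trains j = true) :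
    ∀ lo hi : Nat, lo ≤ t → t ≤ hi → hi ≤ test.length →
    fls_bsearch test (trains.map (fun t => PySem.Str.join "|" t)) lo hi = t := by
  intro lo hi
  induction hd : hi - lo using Nat.strong_induction_on generalizing lo hi with
  | _ d ih =>
    intro hlot hthi hhi
    rw [fls_bsearch]
    by_cases hlh : lo < hi
    · rw [dif_pos hlh]
      simp only
      rw [flsQ_eq_B]
      cases hq : flsQ test trains ((lo + hi) / 2) with
      | true =>
        have ht2 : t ≤ (lo + hi) / 2 := by
          by_contra hcon
          have hb := hbelow ((lo + hi) / 2) (by omega)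
          rw [hq] at hb
          exact absurd hb (by simp)
        exact ih _ (by omega) lo ((lo + hi) / 2) rfl hlot ht2 (by omega)
      | false =>
        have ht2 : (lo + hi) / 2 < t := by
          by_contra hcon
          have hb := habove ((lo + hi) / 2) (by omega) (by omega)
          rw [hq] at hb
          exact absurd hb (by simp)
        exact ih _ (by omega) ((lo + hi) / 2 + 1) hi rfl (by omega) hthi hhi
    · rw [dif_neg hlh]
      omega

lemma fls_main_eq (test : List String) (trains : List (List String)) :
    find_largest_suffix_subsequence test trains = find_largest_suffix_subsequence_alt test trains := by
  unfold find_largest_suffix_subsequence find_largest_suffix_subsequence_alt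
  rw [PySem.List.len_eq]
  by_cases hn : test.length ≤ 1
  · rw [if_pos (by exact_mod_cast hn), if_pos hn]
  · have hn2 : 2 ≤ test.length := by omega
    rw [if_neg (by exact_mod_cast hn), if_neg hn]
    simp only
    have hc : (test.length : Int) - 1 = ((test.length - 1 : Nat) : Int) := by omega
    rw [hc]
    by_cases hall : ∀ j, j < test.length → flsQ test trains j = true
    · rw [fls_loopA_all test trains (test.length - 1) (by omega) (fun j hj => hall j (by omega)) []]
      rw [fls_bsearch_spec test trains 0 (fun j hj => absurd hj (Nat.not_lt_zero j))
            (fun j _ hj => hall j hj) 0 test.length (le_refl 0) (by omega) le_rfl]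
      rw [PySem.List.slice_from_natCast]
      have h3 : test.length - 1 + 1 = test.length := by omega
      rw [h3, List.take_length]
      simp
    · have hex : ∃ j, j < test.length ∧ flsQ test trains j = false := by
        by_contra h2
        apply hall
        intro j hj
        cases hq : flsQ test trains j with
        | true => rfl
        | false => exact absurd ⟨j, hj, hq⟩ h2
      obtain ⟨m, hm, hmf⟩ := hex
      have hrle : Nat.findGreatest (fun j => flsQ test trains j = false) (test.length - 1) ≤ test.length - 1 :=
        Nat.findGreatest_le _
      set r := Nat.findGreatest (fun j => flsQ test trains j = false) (test.length - 1) with hrdef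
      have hrP : flsQ test trains r = false := Nat.findGreatest_spec (P := fun j => flsQ test trains j = false) (n := test.length - 1) (m := m) (by omega) hmf
      have habove : ∀ j, r < j → j ≤ test.length - 1 → flsQ test trains j = true := by
        intro j h1 h2
        have hng := Nat.findGreatest_is_greatest (P := fun j => flsQ test trains j = false)
          (n := test.length - 1) h1 h2
        simpa using hng
      have hbelow : ∀ j, j < r + 1 → flsQ test trains j = false := by
        intro j hj
        cases hq : flsQ test trains j with
        | false => rfl
        | true =>
          have hmono := flsQ_mono_le test trains (i := j) (j := r) (by omega) hq
          rw [hmono] at hrP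
          exact absurd hrP (by simp)
      rw [fls_loopA_stop test trains (test.length - 1) r hrle (by omega) hrP
            (fun j h1 h2 => habove j h1 h2) []]
      rw [fls_bsearch_spec test trains (r + 1) hbelow
            (fun j h1 h2 => habove j (by omega) (by omega)) 0 test.length (by omega) (by omega) le_rfl]
      rw [PySem.List.slice_from_natCast]
      have h3 : test.length - 1 + 1 = test.length := by omega
      rw [h3, List.take_length]
      push_cast
      simp

-- ===== VERDICT (by name: the statement is the Claim_ definition above) =====
theorem find_largest_suffix_subsequence_spec : Claim_equal_find_largest_suffix_subsequence := by
  intro test train_seqs _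
  unfold Spec_find_largest_suffix_subsequence
  exact fls_main_eq test train_seqs
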